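-- pv_equiv track=rewrite | github.com/kashifusmani/interview_prep | recursion/word_split.py | word_split_2
-- ===== SOURCE A (Python) =====
-- def word_split_2(phrase, list_of_words, output = None):
--     #Better than above since it does not perform the hacky replace() on the string - which can be a problem if we have "love" and "loves".
--     #Complexity is O(mn) where n is length of list and m is number of tokens in the string.
--     if output is None: #If we default output=[], it would be overwritten for every recursion!
--         output = []
--
--     for word in list_of_words:
--         if phrase.startswith(word):
--             output.append(word)
--             return word_split_2(phrase[len(word):], list_of_words, output)
--     return output
-- ===== SOURCE B (Python) =====
-- def word_split_2(phrase, list_of_words, output=None):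
--     if output is None:
--         output = []
--     # Index the words once by first character (insertion order kept), then
--     # iteratively consume the phrase, scanning only the bucket of its first char.
--     buckets = {}
--     for w in list_of_words:
--         buckets.setdefault(w[0], []).append(w)
--     while phrase:
--         for w in buckets.get(phrase[0], ()):
--             if phrase.startswith(w):
--                 output.append(w)
--                 phrase = phrase[len(w):]
--                 break
--         else:
--             break
--     return output
-- ===== Notes on version B (the rewrite author's own statement) =====
-- stated objective: faster
-- what changed: Replaces A's recursion that rescans the whole word list each step by an iterative loop over a first-character bucket index built once, so each step scans only the words sharing the phrase's first letter (and no recursion depth limit).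
import Mathlib
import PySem

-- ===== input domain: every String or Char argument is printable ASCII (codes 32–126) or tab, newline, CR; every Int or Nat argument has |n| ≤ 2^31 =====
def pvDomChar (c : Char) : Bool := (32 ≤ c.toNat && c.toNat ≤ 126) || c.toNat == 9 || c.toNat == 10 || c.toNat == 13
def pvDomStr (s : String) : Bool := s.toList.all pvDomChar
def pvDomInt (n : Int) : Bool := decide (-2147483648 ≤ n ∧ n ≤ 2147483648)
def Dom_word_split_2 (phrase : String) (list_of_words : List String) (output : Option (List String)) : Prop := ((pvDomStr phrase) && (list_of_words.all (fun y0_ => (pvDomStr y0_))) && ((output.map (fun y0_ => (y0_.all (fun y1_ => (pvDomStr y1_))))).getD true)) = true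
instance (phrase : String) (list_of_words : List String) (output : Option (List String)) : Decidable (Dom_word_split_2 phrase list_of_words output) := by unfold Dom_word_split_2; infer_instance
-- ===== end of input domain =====

-- B replaces A's recursion (rescan the whole word list each step) by an iterative loop over a
-- first-character bucket index built once; equivalence is about the RETURN value only (the Python
-- A mutates the passed-in `output` list in place, and B performs the same mutation).  Outside
-- Pre_ (an empty word in the list) both Pythons raise: A by unbounded recursion, B at w[0].

-- ===== PORT A =====
-- A's recursion is ported with fuel phrase.length + 1: under Pre_ every matched word is nonempty,
-- so the phrase shrinks each step and the fuel is never exhausted (outside Pre_ the Python recurses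
-- forever).  phrase[len(word):] with 0 ≤ len(word) is List.drop (PySem.List.slice_from_natCast);
-- the for-loop returning on the first match is List.find?.
def wsA (fuel : Nat) (phrase : List Char) (words : List String) (acc : List String) : List String :=
  match fuel with
  | 0 => acc
  | f + 1 =>
    match words.find? (fun w => PySem.Chars.startswith phrase w.toList) with
    | some w => wsA f (phrase.drop w.toList.length) words (acc ++ [w])
    | none => acc

def word_split_2 (phrase : String) (list_of_words : List String) (output : Option (List String)) : List String :=
  wsA (phrase.toList.length + 1) phrase.toList list_of_words (output.getD [])

-- ===== PORT B =====
-- buckets.setdefault(w[0], []).append(w)  =  d.modify w[0] [] (· ++ [w]); the [] branch is a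
-- totalizing guard only: there Python B raises IndexError at w[0], an input outside Pre_
def wsBuckets (words : List String) : PySem.Dict Char (List String) :=
  words.foldl
    (fun d w =>
      match w.toList with
      | [] => d
      | c :: _ => d.modify c [] (· ++ [w]))
    PySem.Dict.empty

-- the while-loop; each matched word is nonempty by construction, so fuel phrase.length suffices
def wsB (fuel : Nat) (phrase : List Char) (buckets : PySem.Dict Char (List String)) (acc : List String) : List String :=
  match fuel with
  | 0 => acc
  | f + 1 =>
    match phrase with
    | [] => acc
    | c :: _ =>
      match (buckets.getD c []).find? (fun w => PySem.Chars.startswith phrase w.toList) with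
      | some w => wsB f (phrase.drop w.toList.length) buckets (acc ++ [w])
      | none => acc

def word_split_2_alt (phrase : String) (list_of_words : List String) (output : Option (List String)) : List String :=
  wsB phrase.toList.length phrase.toList (wsBuckets list_of_words) (output.getD [])

-- ===== PRECONDITION & SPEC =====
-- Pre_ excludes only the inputs on which the Python A raises: if '' is in list_of_words, '' is a
-- prefix of every phrase, so A recurses forever and raises RecursionError (B raises IndexError
-- at w[0] there).
def Pre_word_split_2 (_phrase : String) (list_of_words : List String) (_output : Option (List String)) : Prop :=
  ∀ w ∈ list_of_words, 0 < w.length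
instance (phrase : String) (list_of_words : List String) (output : Option (List String)) : Decidable (Pre_word_split_2 phrase list_of_words output) := by unfold Pre_word_split_2; infer_instance
def pvWitness_word_split_2 : String × List String × Option (List String) := ("banana", ["ban", "ana"], none)

def Spec_word_split_2 (phrase : String) (list_of_words : List String) (output : Option (List String)) (out : List String) : Prop := out = word_split_2_alt phrase list_of_words output
instance (phrase : String) (list_of_words : List String) (output : Option (List String)) (out : List String) : Decidable (Spec_word_split_2 phrase list_of_words output out) := by unfold Spec_word_split_2; infer_instance

-- ===== CLAIM (what is proved, stated in full; the proofs are below) =====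
def Claim_equal_word_split_2 : Prop := ∀ (phrase : String) (list_of_words : List String) (output : Option (List String)), Dom_word_split_2 phrase list_of_words output → Pre_word_split_2 phrase list_of_words output → Spec_word_split_2 phrase list_of_words output (word_split_2 phrase list_of_words output)

-- ===== LEMMAS AND PROOFS =====

-- the bucket of c holds exactly the words whose first character is c, in order
theorem wsBuckets_getD (words : List String) (c : Char) :
    (wsBuckets words).getD c [] =
      words.filter (fun w => w.toList.head? == some c) := by
  have aux : ∀ (ws : List String) (d : PySem.Dict Char (List String)) (c : Char),
      (ws.foldl
        (fun d w =>
          match w.toList with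
          | [] => d
          | c :: _ => d.modify c [] (· ++ [w]))
        d).getD c [] =
      d.getD c [] ++ ws.filter (fun w => w.toList.head? == some c) := by
    intro ws
    induction ws with
    | nil => intro d c; simp
    | cons w t ih =>
      intro d c
      cases hw : w.toList with
      | nil =>
        simp only [List.foldl_cons, List.filter_cons, hw]
        rw [ih]
        simp
      | cons a s =>
        simp only [List.foldl_cons, List.filter_cons, hw]
        rw [ih, PySem.Dict.getD_modify]
        by_cases hca : c = a
        · subst hca; simp
        · simp [hca, Ne.symm hca]
  unfold wsBuckets
  rw [aux]
  simp

-- on a nonempty phrase, searching the whole list equals searching the bucket of its head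
theorem find?_bucket (c : Char) (rest : List Char) (words : List String)
    (h : "" ∉ words) :
    words.find? (fun w => PySem.Chars.startswith (c :: rest) w.toList) =
      (words.filter (fun w => w.toList.head? == some c)).find?
        (fun w => PySem.Chars.startswith (c :: rest) w.toList) := by
  induction words with
  | nil => rfl
  | cons w t ih =>
    have hw : w ≠ "" := fun he => h (by simp [he])
    have ih' := ih (fun hm => h (List.mem_cons_of_mem _ hm))
    by_cases hp : PySem.Chars.startswith (c :: rest) w.toList = true
    · -- w matches, so its head is c and it stays first in the bucket
      have hpre : w.toList <+: (c :: rest) := (PySem.Chars.startswith_iff _ _).mp hp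
      obtain ⟨a, s, hws⟩ : ∃ a s, w.toList = a :: s := by
        cases hcase : w.toList with
        | nil => exact absurd (String.toList_eq_nil_iff.mp hcase) hw
        | cons a s => exact ⟨a, s, rfl⟩
      have hac : a = c := by
        rw [hws] at hpre
        exact (List.cons_prefix_cons.mp hpre).1
      have hq : (w.toList.head? == some c) = true := by simp [hws, hac]
      simp only [List.filter_cons, hq, if_true]
      rw [List.find?_cons, List.find?_cons, hp]
    · simp only [List.filter_cons]
      by_cases hq : (w.toList.head? == some c) = true
      · simp [hp, hq, ih']
      · simp [hq, hp, ih']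

theorem wsA_eq_wsB (words : List String) (h : "" ∉ words) :
    ∀ (n : Nat) (phrase : List Char) (acc : List String), phrase.length ≤ n →
      wsA (n + 1) phrase words acc = wsB n phrase (wsBuckets words) acc := by
  have hnil : ∀ (f : Nat) (acc : List String),
      wsA (f + 1) ([] : List Char) words acc = acc := by
    intro f acc
    have hfind : words.find? (fun w => PySem.Chars.startswith ([] : List Char) w.toList) = none := by
      apply List.find?_eq_none.mpr
      intro w hwmem
      have hw : w ≠ "" := fun he => h (he ▸ hwmem)
      obtain ⟨a, s, hws⟩ : ∃ a s, w.toList = a :: s := by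
        cases hcase : w.toList with
        | nil => exact absurd (String.toList_eq_nil_iff.mp hcase) hw
        | cons a s => exact ⟨a, s, rfl⟩
      simp [PySem.Chars.startswith_iff, hws]
    simp [wsA, hfind]
  intro n
  induction n with
  | zero =>
    intro phrase acc hlen
    have : phrase = [] := List.length_eq_zero_iff.mp (Nat.le_zero.mp hlen)
    subst this
    rw [hnil 0 acc]; rfl
  | succ n ih =>
    intro phrase acc hlen
    cases phrase with
    | nil => rw [hnil (n + 1) acc]; rfl
    | cons c rest =>
      show (match words.find? (fun w => PySem.Chars.startswith (c :: rest) w.toList) with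
            | some w => wsA (n + 1) ((c :: rest).drop w.toList.length) words (acc ++ [w])
            | none => acc) = wsB (n + 1) (c :: rest) (wsBuckets words) acc
      have hb : ((wsBuckets words).getD c []).find?
            (fun w => PySem.Chars.startswith (c :: rest) w.toList) =
          words.find? (fun w => PySem.Chars.startswith (c :: rest) w.toList) := by
        rw [wsBuckets_getD, ← find?_bucket c rest words h]
      cases hf : words.find? (fun w => PySem.Chars.startswith (c :: rest) w.toList) with
      | none => simp only [wsB, hb, hf]
      | some w =>
        have hwmem : w ∈ words := List.mem_of_find?_eq_some hf
        have hw : w ≠ "" := fun he => h (he ▸ hwmem)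
        have hwlen : 1 ≤ w.toList.length := by
          cases hcase : w.toList with
          | nil => exact absurd (String.toList_eq_nil_iff.mp hcase) hw
          | cons a s => simp
        simp only [wsB, hb, hf]
        apply ih
        simp only [List.length_drop, List.length_cons]
        simp only [List.length_cons] at hlen
        omega

-- ===== VERDICT (by name: the statement is the Claim_ definition above) =====
theorem word_split_2_spec : Claim_equal_word_split_2 := by
  intro phrase words output _ hpre0
  have hpre : "" ∉ words := fun hm => by simpa using hpre0 "" hm
  unfold Spec_word_split_2 word_split_2 word_split_2_alt
  exact wsA_eq_wsB words hpre phrase.toList.length phrase.toList (output.getD []) le_rfl
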